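-- pv_equiv track=rewrite | github.com/GoGoCrisp/Chinese-Latinization-NLP | 1.Tokenization/deep_investigate_ad.py | _tone_numbers_to_marks
-- ===== SOURCE A (Python) =====
-- def _tone_numbers_to_marks(pinyin: str) -> str:
--     """C格式(数字) → D格式(符号)"""
--     tone_marks = {
--         'a': {'1': 'ā', '2': 'á', '3': 'ǎ', '4': 'à'},
--         'e': {'1': 'ē', '2': 'é', '3': 'ě', '4': 'è'},
--         'i': {'1': 'ī', '2': 'í', '3': 'ǐ', '4': 'ì'},
--         'o': {'1': 'ō', '2': 'ó', '3': 'ǒ', '4': 'ò'},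
--         'u': {'1': 'ū', '2': 'ú', '3': 'ǔ', '4': 'ù'},
--         'ü': {'1': 'ǖ', '2': 'ǘ', '3': 'ǚ', '4': 'ǜ'},
--         'v': {'1': 'ǖ', '2': 'ǘ', '3': 'ǚ', '4': 'ǜ'},
--     }
--
--     if not pinyin or not pinyin[-1].isdigit():
--         return pinyin
--
--     tone_num = pinyin[-1]
--     pinyin_base = pinyin[:-1]
--
--     if tone_num in ['0', '5']:
--         return pinyin_base
--
--     result = []
--     matched = False
--
--     for char in pinyin_base:
--         if not matched and char in 'ae':
--             result.append(tone_marks.get(char, {}).get(tone_num, char))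
--             matched = True
--         else:
--             result.append(char)
--
--     if not matched:
--         for i in range(len(result) - 1, -1, -1):
--             char = result[i]
--             if char in 'iouüv':
--                 result[i] = tone_marks.get(char, {}).get(tone_num, char)
--                 break
--
--     return "".join(result)
-- ===== SOURCE B (Python) =====
-- def _tone_numbers_to_marks(pinyin: str) -> str:
--     """C格式(数字) → D格式(符号)"""
--     tone_marks = {
--         'a': {'1': 'ā', '2': 'á', '3': 'ǎ', '4': 'à'},
--         'e': {'1': 'ē', '2': 'é', '3': 'ě', '4': 'è'},
--         'i': {'1': 'ī', '2': 'í', '3': 'ǐ', '4': 'ì'},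
--         'o': {'1': 'ō', '2': 'ó', '3': 'ǒ', '4': 'ò'},
--         'u': {'1': 'ū', '2': 'ú', '3': 'ǔ', '4': 'ù'},
--         'ü': {'1': 'ǖ', '2': 'ǘ', '3': 'ǚ', '4': 'ǜ'},
--         'v': {'1': 'ǖ', '2': 'ǘ', '3': 'ǚ', '4': 'ǜ'},
--     }
--
--     if not pinyin or not pinyin[-1].isdigit():
--         return pinyin
--
--     tone_num = pinyin[-1]
--     base = pinyin[:-1]
--
--     if tone_num in ['0', '5']:
--         return base
--
--     # single forward pass: first 'a'/'e' wins immediately, otherwise the last 'iouüv'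
--     idx = None
--     for i, ch in enumerate(base):
--         if ch in 'ae':
--             idx = i
--             break
--         if ch in 'iouüv':
--             idx = i
--
--     if idx is None:
--         return base
--     ch = base[idx]
--     return base[:idx] + tone_marks.get(ch, {}).get(tone_num, ch) + base[idx + 1:]
-- ===== Notes on version B (the rewrite author's own statement) =====
-- stated objective: alternative
-- what changed: A builds the result forward with a matched flag and, if no 'a'/'e' was replaced, rescans the built list backwards for the last 'iouüv'; B does a single forward pass that records the target index (first 'a'/'e' breaks, last 'iouüv' otherwise) and splices the diacritic in with one slice concatenation.
import Mathlib
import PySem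

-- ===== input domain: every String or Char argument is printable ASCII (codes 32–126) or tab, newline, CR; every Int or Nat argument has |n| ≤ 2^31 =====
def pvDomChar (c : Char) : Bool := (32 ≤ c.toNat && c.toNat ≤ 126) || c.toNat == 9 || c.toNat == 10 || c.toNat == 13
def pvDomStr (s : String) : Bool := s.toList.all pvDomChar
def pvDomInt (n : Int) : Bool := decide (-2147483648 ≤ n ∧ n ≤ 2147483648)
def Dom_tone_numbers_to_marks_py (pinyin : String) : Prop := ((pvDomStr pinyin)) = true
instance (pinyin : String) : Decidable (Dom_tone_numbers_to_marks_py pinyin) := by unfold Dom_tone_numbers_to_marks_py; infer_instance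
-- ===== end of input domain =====

-- B replaces A's forward build-and-flag pass plus separate backward scan by ONE forward pass that
-- records the target index (first 'a'/'e' breaks, last 'iouüv' otherwise) and splices the mark in.
-- (objective: alternative/simpler decomposition; same asymptotic cost)

-- shared helpers (the tone_marks dict and the membership tests, identical in both Pythons)
def toneMarks : PySem.Dict Char (PySem.Dict Char Char) := PySem.Dict.mk
  [ ('a', PySem.Dict.mk [('1','ā'),('2','á'),('3','ǎ'),('4','à')])
  , ('e', PySem.Dict.mk [('1','ē'),('2','é'),('3','ě'),('4','è')])
  , ('i', PySem.Dict.mk [('1','ī'),('2','í'),('3','ǐ'),('4','ì')])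
  , ('o', PySem.Dict.mk [('1','ō'),('2','ó'),('3','ǒ'),('4','ò')])
  , ('u', PySem.Dict.mk [('1','ū'),('2','ú'),('3','ǔ'),('4','ù')])
  , ('ü', PySem.Dict.mk [('1','ǖ'),('2','ǘ'),('3','ǚ'),('4','ǜ')])
  , ('v', PySem.Dict.mk [('1','ǖ'),('2','ǘ'),('3','ǚ'),('4','ǜ')]) ]

-- tone_marks.get(c, {}).get(t, c)
def tmGet (c t : Char) : Char := ((toneMarks.get? c).getD (PySem.Dict.mk [])).getD t c

def isAE (c : Char) : Bool := c == 'a' || c == 'e'          -- char in 'ae'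
def isIOUV (c : Char) : Bool := c == 'i' || c == 'o' || c == 'u' || c == 'ü' || c == 'v'  -- char in 'iouüv'

-- ===== PORT A =====
-- A's forward loop: builds result, sets matched at the first 'a'/'e'
def aLoop (t : Char) : List Char → Bool → List Char × Bool
  | [], m => ([], m)
  | c :: rest, m =>
    if !m && isAE c then
      let p := aLoop t rest true
      (tmGet c t :: p.1, p.2)
    else
      let p := aLoop t rest m
      (c :: p.1, p.2)

-- A's backward index loop (for i in range(len-1,-1,-1): replace first 'iouüv' seen, break),
-- transcribed as a scan over the reversed list
def aBackRev (t : Char) : List Char → List Char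
  | [] => []
  | c :: rest => if isIOUV c then tmGet c t :: rest else c :: aBackRev t rest

def tone_numbers_to_marks_py (pinyin : String) : String :=
  match pinyin.toList.getLast? with            -- `not pinyin or not pinyin[-1].isdigit()`
  | none => pinyin
  | some t =>
    if PySem.Chars.isdigit t = false then pinyin
    else
      let base := pinyin.toList.dropLast       -- pinyin[:-1] (exact: pinyin is nonempty here)
      if t = '0' ∨ t = '5' then String.ofList base
      else
        let p := aLoop t base false
        String.ofList (if p.2 = false then (aBackRev t p.1.reverse).reverse else p.1)

-- ===== PORT B =====
-- B's single forward pass: first 'a'/'e' wins immediately; otherwise remember the last 'iouüv'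
def bFind : List Char → Nat → Option Nat → Option Nat
  | [], _, acc => acc
  | c :: rest, i, acc =>
    if isAE c then some i
    else if isIOUV c then bFind rest (i+1) (some i)
    else bFind rest (i+1) acc

-- splice the mark at the found index (Source B's tail: base[:idx] + mark + base[idx+1:])
def bSplice (t : Char) (cs : List Char) : List Char :=
  match bFind cs 0 none with
  | none => cs
  | some i => cs.take i ++ [tmGet (cs.getD i ' ') t] ++ cs.drop (i+1)

def tone_numbers_to_marks_py_alt (pinyin : String) : String :=
  match pinyin.toList.getLast? with
  | none => pinyin
  | some t =>
    if PySem.Chars.isdigit t = false then pinyin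
    else
      let base := pinyin.toList.dropLast
      if t = '0' ∨ t = '5' then String.ofList base
      else String.ofList (bSplice t base)

-- ===== PRECONDITION & SPEC =====
def Spec_tone_numbers_to_marks_py (pinyin : String) (out : String) : Prop := out = tone_numbers_to_marks_py_alt pinyin
instance (pinyin : String) (out : String) : Decidable (Spec_tone_numbers_to_marks_py pinyin out) := by unfold Spec_tone_numbers_to_marks_py; infer_instance

-- ===== CLAIM (what is proved, stated in full; the proofs are below) =====
def Claim_equal_tone_numbers_to_marks_py : Prop := ∀ (pinyin : String), Dom_tone_numbers_to_marks_py pinyin → Spec_tone_numbers_to_marks_py pinyin (tone_numbers_to_marks_py pinyin)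

-- ===== LEMMAS AND PROOFS =====

theorem aLoop_true (t : Char) (cs : List Char) : aLoop t cs true = (cs, true) := by
  induction cs with
  | nil => rfl
  | cons c rest ih => simp [aLoop, ih]

theorem aLoop_noAE (t : Char) (cs : List Char) (h : cs.any isAE = false) :
    aLoop t cs false = (cs, false) := by
  induction cs with
  | nil => rfl
  | cons c rest ih =>
    simp only [List.any_cons, Bool.or_eq_false_iff] at h
    simp [aLoop, h.1, ih h.2]

theorem bFind_shift (cs : List Char) (i : Nat) (acc : Option Nat) :
    bFind cs i acc = match bFind cs 0 none with
                     | some j => some (i + j)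
                     | none => acc := by
  induction cs generalizing i acc with
  | nil => rfl
  | cons c rest ih =>
    by_cases hae : isAE c = true
    · simp [bFind, hae]
    · by_cases hv : isIOUV c = true
      · simp only [bFind, hae, hv, if_true]
        rw [ih (i+1) (some i), ih 1 (some 0)]
        cases bFind rest 0 none with
        | none => simp
        | some j => simp; omega
      · simp only [bFind, hae, hv]
        rw [ih (i+1) acc, ih 1 none]
        cases bFind rest 0 none with
        | none => simp
        | some j => simp; omega

theorem bFind_none (cs : List Char) (h : bFind cs 0 none = none) :
    cs.any isAE = false ∧ cs.any isIOUV = false := by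
  induction cs with
  | nil => simp
  | cons c rest ih =>
    by_cases hae : isAE c = true
    · simp [bFind, hae] at h
    · by_cases hv : isIOUV c = true
      · exfalso
        simp only [bFind, hae, hv, if_true] at h
        rw [bFind_shift rest 1 (some 0)] at h
        cases hb : bFind rest 0 none <;> simp [hb] at h
      · simp only [bFind, hae, hv] at h
        rw [bFind_shift rest 1 none] at h
        have hb : bFind rest 0 none = none := by
          cases hb : bFind rest 0 none <;> simp [hb] at h ⊢
        have := ih hb
        simp [hae, hv, this.1, this.2]

theorem aBackRev_append (t : Char) (xs ys : List Char) :
    aBackRev t (xs ++ ys) =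
      if xs.any isIOUV = true then aBackRev t xs ++ ys else xs ++ aBackRev t ys := by
  induction xs with
  | nil => simp
  | cons c rest ih =>
    by_cases hv : isIOUV c = true
    · simp [aBackRev, hv]
    · simp only [List.cons_append, aBackRev, hv, List.any_cons, Bool.false_or, ih]
      by_cases hr : rest.any isIOUV = true <;> simp [hr]

-- bSplice commutes with cons when the tail already contains the target
theorem bSplice_cons (t c : Char) (rest : List Char) (hae : isAE c = false)
    (j : Nat) (hj : bFind rest 0 none = some j) :
    bSplice t (c :: rest) = c :: bSplice t rest := by
  have hfind : bFind (c :: rest) 0 none = some (1 + j) := by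
    by_cases hv : isIOUV c = true
    · simp only [bFind, hae, hv]
      rw [bFind_shift rest 1 (some 0), hj]; simp
    · simp only [bFind, hae, hv]
      rw [bFind_shift rest 1 none, hj]; simp
  simp only [bSplice, hfind, hj]
  have h1 : 1 + j = j + 1 := by omega
  simp [h1, List.getD, List.take_succ_cons, List.drop_succ_cons]

-- the no-'ae' case: A's backward scan equals B's splice
theorem back_eq_bSplice (t : Char) (cs : List Char) (h : cs.any isAE = false) :
    (aBackRev t cs.reverse).reverse = bSplice t cs := by
  induction cs with
  | nil => rfl
  | cons c rest ih =>
    simp only [List.any_cons, Bool.or_eq_false_iff] at h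
    obtain ⟨hc, hrest⟩ := h
    by_cases hi : rest.any isIOUV = true
    · -- rest has a vowel: both keep c and recurse into rest
      have hsome : ∃ j, bFind rest 0 none = some j := by
        cases hb : bFind rest 0 none with
        | none => exact absurd (bFind_none rest hb).2 (by simp [hi])
        | some j => exact ⟨j, rfl⟩
      obtain ⟨j, hj⟩ := hsome
      rw [List.reverse_cons, aBackRev_append, if_pos (by simpa using hi)]
      rw [List.reverse_append]
      simp only [List.reverse_cons, List.reverse_nil, List.nil_append]
      rw [ih hrest, bSplice_cons t c rest hc j hj]
      rfl
    · -- rest has no vowel: the decision is about c alone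
      have hnone : bFind rest 0 none = none := by
        cases hb : bFind rest 0 none with
        | none => rfl
        | some j =>
          exfalso
          -- a some-result means rest has an 'ae' or 'iouüv'; both are excluded
          have : ∀ (l : List Char), l.any isAE = false → l.any isIOUV = false →
              ∀ i acc, bFind l i acc = acc := by
            intro l
            induction l with
            | nil => intro _ _ i acc; rfl
            | cons d ds ihd =>
              intro h1 h2 i acc
              simp only [List.any_cons, Bool.or_eq_false_iff] at h1 h2
              simp [bFind, h1.1, h2.1, ihd h1.2 h2.2]
          have := this rest hrest (by simpa using hi) 0 none
          rw [this] at hb; simp at hb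
      rw [List.reverse_cons, aBackRev_append,
        if_neg (by simp; intro x hx; have := List.any_eq_false.mp (by simpa using hi) x (by simpa using hx); simpa using this)]
      by_cases hv : isIOUV c = true
      · have hfind : bFind (c :: rest) 0 none = some 0 := by
          simp only [bFind, hc, hv]
          rw [bFind_shift rest 1 (some 0), hnone]; simp
        simp [aBackRev, hv, bSplice, hfind, List.getD]
      · have hfind : bFind (c :: rest) 0 none = none := by
          simp only [bFind, hc, hv]
          rw [bFind_shift rest 1 none, hnone]; simp
        simp [aBackRev, hv, bSplice, hfind]

-- the 'ae' case: A's forward loop matched, and its result equals B's splice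
theorem aLoop_AE (t : Char) (cs : List Char) (h : cs.any isAE = true) :
    (aLoop t cs false).1 = bSplice t cs ∧ (aLoop t cs false).2 = true := by
  induction cs with
  | nil => simp at h
  | cons c rest ih =>
    by_cases hc : isAE c = true
    · have hfind : bFind (c :: rest) 0 none = some 0 := by simp [bFind, hc]
      simp [aLoop, hc, aLoop_true, bSplice, hfind, List.getD]
    · have hc' : isAE c = false := by simpa using hc
      have hrest : rest.any isAE = true := by
        simp only [List.any_cons] at h
        simpa [hc'] using h
      have hsome : ∃ j, bFind rest 0 none = some j := by
        cases hb : bFind rest 0 none with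
        | none => exact absurd (bFind_none rest hb).1 (by simp [hrest])
        | some j => exact ⟨j, rfl⟩
      obtain ⟨j, hj⟩ := hsome
      obtain ⟨ih1, ih2⟩ := ih hrest
      constructor
      · have hb := bSplice_cons t c rest hc' j hj
        simp [aLoop, hc', hb, ih1]
      · simp [aLoop, hc', ih2]

-- the post-guard computations agree
theorem core_eq (t : Char) (base : List Char) :
    (let p := aLoop t base false
     (if p.2 = false then (aBackRev t p.1.reverse).reverse else p.1)) = bSplice t base := by
  by_cases h : base.any isAE = true
  · obtain ⟨h1, h2⟩ := aLoop_AE t base h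
    simp [h2, h1]
  · have h' : base.any isAE = false := by simpa using h
    rw [aLoop_noAE t base h']
    simpa using back_eq_bSplice t base h'

-- ===== VERDICT (by name: the statement is the Claim_ definition above) =====
theorem tone_numbers_to_marks_py_spec : Claim_equal_tone_numbers_to_marks_py := by
  intro pinyin _
  unfold Spec_tone_numbers_to_marks_py tone_numbers_to_marks_py tone_numbers_to_marks_py_alt
  cases h : pinyin.toList.getLast? with
  | none => rfl
  | some t =>
    by_cases hd : PySem.Chars.isdigit t = false
    · simp [hd]
    · by_cases h05 : t = '0' ∨ t = '5'
      · simp [hd, h05]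
      · simp only [hd, h05, if_false]
        rw [core_eq]
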